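-- pv_equiv track=rewrite | github.com/Redvarik/pythonProject2 | Информатикс/112305.py | compress_array
-- ===== SOURCE A (Python) =====
-- def compress_array(N, arr):
--     seen = set()
--     for i in range(N):
--         if arr[i] in seen:
--             arr[i] = 0
--         else:
--             seen.add(arr[i])
--
--     non_zero_index = 0
--     for i in range(N):
--         if arr[i] != 0:
--             arr[non_zero_index] = arr[i]
--             non_zero_index += 1
--
--     for i in range(non_zero_index, N):
--         arr[i] = 0
--
--     return arr
-- ===== SOURCE B (Python) =====
-- def compress_array(N, arr):
--     seen = set()
--     result = []
--     for i in range(N):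
--         x = arr[i]
--         if x != 0 and x not in seen:
--             seen.add(x)
--             result.append(x)
--     for i in range(N):
--         arr[i] = result[i] if i < len(result) else 0
--     return arr
-- ===== Notes on version B (the rewrite author's own statement) =====
-- stated objective: simpler
-- what changed: A's three in-place passes (zero out duplicates, compact non-zeros with a cursor, zero-fill the tail) are replaced by one gather pass building the kept values in a fresh list plus one write-back pass.
import Mathlib
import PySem

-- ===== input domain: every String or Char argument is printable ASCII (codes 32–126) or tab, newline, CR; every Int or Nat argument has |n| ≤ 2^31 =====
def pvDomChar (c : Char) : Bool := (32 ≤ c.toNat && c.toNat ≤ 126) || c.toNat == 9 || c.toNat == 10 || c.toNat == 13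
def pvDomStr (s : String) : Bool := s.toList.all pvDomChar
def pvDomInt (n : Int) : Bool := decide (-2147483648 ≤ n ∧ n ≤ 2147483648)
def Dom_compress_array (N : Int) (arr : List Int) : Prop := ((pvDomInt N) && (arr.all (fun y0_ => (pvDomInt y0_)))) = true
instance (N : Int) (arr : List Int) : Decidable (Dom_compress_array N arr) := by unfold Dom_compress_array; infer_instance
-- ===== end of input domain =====

-- B replaces A's three in-place passes (zero duplicates, compact with a cursor, zero-fill)
-- by a gather pass into a fresh list plus a write-back pass: simpler decomposition, same cost.
-- Both Pythons mutate arr in place identically; the theorems are about the returned list.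

-- ===== PORT A =====
-- pass 1: for i in range(N): if arr[i] in seen: arr[i] = 0 else: seen.add(arr[i])
-- (fuel = number of remaining iterations; out-of-range read aborts — unreachable under Pre_)
def caPass1 (a : List Int) (seen : PySem.Set Int) (i : Nat) : Nat → List Int
  | 0 => a
  | fuel + 1 =>
    match a[i]? with
    | none => a
    | some v =>
      if PySem.Set.contains seen v then caPass1 (a.set i 0) seen (i + 1) fuel
      else caPass1 a (PySem.Set.add seen v) (i + 1) fuel

-- pass 2: compaction with the non_zero_index cursor
def caPass2 (a : List Int) (nzi i : Nat) : Nat → List Int × Nat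
  | 0 => (a, nzi)
  | fuel + 1 =>
    match a[i]? with
    | none => (a, nzi)
    | some v =>
      if v ≠ 0 then caPass2 (a.set nzi v) (nzi + 1) (i + 1) fuel
      else caPass2 a nzi (i + 1) fuel

-- pass 3: for i in range(non_zero_index, N): arr[i] = 0
def caPass3 (a : List Int) (i : Nat) : Nat → List Int
  | 0 => a
  | fuel + 1 => caPass3 (a.set i 0) (i + 1) fuel

def compress_array (N : Int) (arr : List Int) : List Int :=
  let n := N.toNat
  let a1 := caPass1 arr PySem.Set.empty 0 n
  let (a2, k) := caPass2 a1 0 0 n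
  caPass3 a2 k (n - k)

-- ===== PORT B =====
-- gather pass: result of kept first-occurrence non-zero values
def cbGather (arr : List Int) (seen : PySem.Set Int) (res : List Int) (i : Nat) : Nat → List Int
  | 0 => res
  | fuel + 1 =>
    match arr[i]? with
    | none => res
    | some x =>
      if x ≠ 0 ∧ ¬ PySem.Set.contains seen x then
        cbGather arr (PySem.Set.add seen x) (res ++ [x]) (i + 1) fuel
      else cbGather arr seen res (i + 1) fuel

-- write-back pass: arr[i] = result[i] if i < len(result) else 0
def cbWrite (a res : List Int) (i : Nat) : Nat → List Int
  | 0 => a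
  | fuel + 1 =>
    cbWrite (a.set i (if i < res.length then res.getD i 0 else 0)) res (i + 1) fuel

def compress_array_alt (N : Int) (arr : List Int) : List Int :=
  let n := N.toNat
  let res := cbGather arr PySem.Set.empty [] 0 n
  cbWrite arr res 0 n

-- ===== PRECONDITION & SPEC =====
-- Pre_ excludes exactly N > len(arr), where the Python A raises IndexError.
def Pre_compress_array (N : Int) (arr : List Int) : Prop := N ≤ (arr.length : Int)
instance (N : Int) (arr : List Int) : Decidable (Pre_compress_array N arr) := by
  unfold Pre_compress_array; infer_instance

def pvWitness_compress_array : Int × List Int := (5, [3, 0, 2, 3, 2, 7])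

def Spec_compress_array (N : Int) (arr : List Int) (out : List Int) : Prop := out = compress_array_alt N arr
instance (N : Int) (arr : List Int) (out : List Int) : Decidable (Spec_compress_array N arr out) := by unfold Spec_compress_array; infer_instance

-- ===== CLAIM (what is proved, stated in full; the proofs are below) =====
def Claim_equal_compress_array : Prop := ∀ (N : Int) (arr : List Int), Dom_compress_array N arr → Pre_compress_array N arr → Spec_compress_array N arr (compress_array N arr)

-- ===== LEMMAS AND PROOFS =====

-- reference "pass 1" transform: duplicates become 0, first occurrences kept
def gRef (s : PySem.Set Int) : List Int → List Int
  | [] => []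
  | x :: xs => if PySem.Set.contains s x then 0 :: gRef s xs else x :: gRef (PySem.Set.add s x) xs

-- reference gather: kept first-occurrence non-zero values
def fRef (s : PySem.Set Int) : List Int → List Int
  | [] => []
  | x :: xs => if x ≠ 0 ∧ ¬ PySem.Set.contains s x then x :: fRef (PySem.Set.add s x) xs else fRef s xs

theorem take_succ_set (l : List Int) (n : Nat) (a : Int) (h : n < l.length) :
    (l.set n a).take (n+1) = l.take n ++ [a] := by
  rw [List.set_eq_take_append_cons_drop, if_pos h, List.take_append]
  have h1 : (l.take n).length = n := by simp [Nat.le_of_lt h]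
  rw [List.take_take]
  simp [h1]

theorem gRef_length (s : PySem.Set Int) (l : List Int) : (gRef s l).length = l.length := by
  induction l generalizing s with
  | nil => rfl
  | cons x xs ih => simp only [gRef]; split <;> simp [ih]

theorem fRef_length_le (s : PySem.Set Int) (l : List Int) : (fRef s l).length ≤ l.length := by
  induction l generalizing s with
  | nil => simp [fRef]
  | cons x xs ih =>
    simp only [fRef]; split
    · simpa using ih (PySem.Set.add s x)
    · exact Nat.le_succ_of_le (ih s)

theorem filter_gRef (l : List Int) (s t : PySem.Set Int)
    (h : ∀ x : Int, x ≠ 0 → (x ∈ s ↔ x ∈ t)) :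
    (gRef s l).filter (· ≠ 0) = fRef t l := by
  induction l generalizing s t with
  | nil => rfl
  | cons x xs ih =>
    simp only [gRef, fRef]
    by_cases hx : x = 0
    · subst hx
      have hts : ¬ ((0:Int) ≠ 0 ∧ ¬ PySem.Set.contains t 0) := by simp
      rw [if_neg hts]
      split
      · simpa using ih s t h
      · have : (List.filter (· ≠ 0) (0 :: gRef (PySem.Set.add s 0) xs)) = List.filter (· ≠ 0) (gRef (PySem.Set.add s 0) xs) := by simp
        rw [this]
        refine ih _ t ?_
        intro y hy
        rw [PySem.Set.mem_add]
        constructor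
        · rintro (h1 | h1)
          · exact (h y hy).1 h1
          · exact absurd h1 hy
        · intro h1; exact Or.inl ((h y hy).2 h1)
    · by_cases hs : PySem.Set.contains s x
      · have hmem : x ∈ s := by simpa using hs
        have hmt : x ∈ t := (h x hx).1 hmem
        rw [if_pos hs, if_neg (by simp [hmt])]
        simpa using ih s t h
      · have hmem : ¬ x ∈ s := by simpa using hs
        have hmt : ¬ x ∈ t := fun hh => hmem ((h x hx).2 hh)
        rw [if_neg hs, if_pos ⟨hx, by simpa using hmt⟩]
        have : List.filter (· ≠ 0) (x :: gRef (PySem.Set.add s x) xs)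
            = x :: List.filter (· ≠ 0) (gRef (PySem.Set.add s x) xs) := by simp [hx]
        rw [this]
        refine congrArg (x :: ·) (ih _ _ ?_)
        intro y hy
        rw [PySem.Set.mem_add, PySem.Set.mem_add]
        constructor
        · rintro (h1 | h1)
          · exact Or.inl ((h y hy).1 h1)
          · exact Or.inr h1
        · rintro (h1 | h1)
          · exact Or.inl ((h y hy).2 h1)
          · exact Or.inr h1

theorem caPass1_eq (fuel : Nat) : ∀ (i : Nat) (a : List Int) (s : PySem.Set Int),
    i + fuel ≤ a.length →
    caPass1 a s i fuel = a.take i ++ gRef s ((a.drop i).take fuel) ++ a.drop (i + fuel) := by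
  induction fuel with
  | zero => intro i a s h; simp [caPass1, gRef]
  | succ f ih =>
    intro i a s h
    have hi : i < a.length := by omega
    have hget : a[i]? = some a[i] := List.getElem?_eq_getElem hi
    have hdrop : a.drop i = a[i] :: a.drop (i+1) := List.drop_eq_getElem_cons hi
    rw [caPass1]
    simp only [hget]
    rw [hdrop]
    simp only [List.take_succ_cons, gRef]
    by_cases hc : PySem.Set.contains s a[i]
    · rw [if_pos hc, if_pos hc]
      rw [ih (i+1) (a.set i 0) s (by simp; omega)]
      rw [take_succ_set a i 0 hi, List.drop_set_of_lt (by omega), List.drop_set_of_lt (by omega)]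
      have : i + 1 + f = i + (f + 1) := by omega
      simp [this, List.append_assoc]
    · rw [if_neg hc, if_neg hc]
      rw [ih (i+1) a _ (by omega)]
      have htake : a.take (i+1) = a.take i ++ [a[i]] := by
        rw [List.take_add_one, hget]; rfl
      rw [show i + 1 + f = i + (f + 1) from by omega, ]
      conv_rhs => rw [← List.singleton_append, ← List.append_assoc, ← htake]

theorem caPass2_eq (fuel : Nat) : ∀ (i nzi : Nat) (a : List Int),
    nzi ≤ i → i + fuel ≤ a.length →
    (caPass2 a nzi i fuel).2 = nzi + (((a.drop i).take fuel).filter (· ≠ 0)).length ∧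
    ∃ junk : List Int,
      (caPass2 a nzi i fuel).1
        = a.take nzi ++ ((a.drop i).take fuel).filter (· ≠ 0) ++ junk ++ a.drop (i + fuel) ∧
      junk.length = i + fuel - (nzi + (((a.drop i).take fuel).filter (· ≠ 0)).length) := by
  induction fuel with
  | zero =>
    intro i nzi a hni h
    refine ⟨by simp [caPass2], (a.take i).drop nzi, ?_, ?_⟩
    · have h1 : a.take nzi ++ (a.take i).drop nzi = a.take i := by
        conv_lhs => rw [show a.take nzi = (a.take i).take nzi from by
          rw [List.take_take, Nat.min_eq_left hni]]
        exact List.take_append_drop _ _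
      simp only [caPass2, List.take_zero, List.filter_nil, List.append_nil,
        Nat.add_zero]
      rw [List.append_assoc, ← List.append_assoc, h1, List.take_append_drop]
    · simp only [List.take_zero, List.filter_nil, List.length_nil, List.length_drop, List.length_take, Nat.add_zero]
      omega
  | succ f ih =>
    intro i nzi a hni h
    have hi : i < a.length := by omega
    have hdrop : a.drop i = a[i] :: a.drop (i+1) := List.drop_eq_getElem_cons hi
    rw [caPass2]
    simp only [List.getElem?_eq_getElem hi]
    rw [hdrop, List.take_succ_cons]
    by_cases hz : a[i] = 0
    · rw [if_neg (by simp [hz])]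
      rw [hz, List.filter_cons_of_neg (by simp)]
      obtain ⟨h2, junk, hc, hj⟩ := ih (i+1) nzi a (by omega) (by omega)
      refine ⟨by rw [h2], junk, ?_, ?_⟩
      · rw [hc, show i + 1 + f = i + (f + 1) from by omega]
      · rw [hj]; omega
    · rw [if_pos (by simp [hz])]
      rw [List.filter_cons_of_pos (by simp [hz])]
      have hnl : nzi < a.length := by omega
      have hlen : (a.set nzi a[i]).length = a.length := by simp
      obtain ⟨h2, junk, hc, hj⟩ := ih (i+1) (nzi+1) (a.set nzi a[i]) (by omega) (by omega)
      have hda : (a.set nzi a[i]).drop (i+1) = a.drop (i+1) := List.drop_set_of_lt (by omega)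
      rw [hda] at h2 hc hj
      refine ⟨by rw [h2]; simp; omega, junk, ?_, ?_⟩
      · rw [hc, take_succ_set a nzi a[i] hnl, List.drop_set_of_lt (by omega),
          show i + 1 + f = i + (f + 1) from by omega]
        simp [List.append_assoc]
      · rw [hj]; simp; omega

theorem caPass3_eq (fuel : Nat) : ∀ (i : Nat) (a : List Int),
    i + fuel ≤ a.length →
    caPass3 a i fuel = a.take i ++ List.replicate fuel 0 ++ a.drop (i + fuel) := by
  induction fuel with
  | zero => intro i a h; simp [caPass3, List.take_append_drop]
  | succ f ih =>
    intro i a h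
    have hi : i < a.length := by omega
    rw [caPass3, ih (i+1) _ (by simp; omega)]
    rw [take_succ_set a i 0 hi, List.drop_set_of_lt (by omega)]
    simp [List.replicate_succ, List.append_assoc]
    omega

theorem cbGather_eq (fuel : Nat) : ∀ (i : Nat) (arr res : List Int) (s : PySem.Set Int),
    i + fuel ≤ arr.length →
    cbGather arr s res i fuel = res ++ fRef s ((arr.drop i).take fuel) := by
  induction fuel with
  | zero => intro i arr res s h; simp [cbGather, fRef]
  | succ f ih =>
    intro i arr res s h
    have hi : i < arr.length := by omega
    rw [cbGather]
    simp only [List.getElem?_eq_getElem hi]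
    rw [List.drop_eq_getElem_cons hi]
    simp only [List.take_succ_cons, fRef]
    split
    · rw [ih (i+1) arr _ _ (by omega)]; simp
    · rw [ih (i+1) arr _ _ (by omega)]

theorem cbWrite_eq (fuel : Nat) : ∀ (i : Nat) (a res : List Int),
    i + fuel ≤ a.length →
    cbWrite a res i fuel
      = a.take i ++ (res.drop i).take fuel ++ List.replicate (fuel - (res.length - i)) 0
          ++ a.drop (i + fuel) := by
  induction fuel with
  | zero => intro i a res h; simp [cbWrite]
  | succ f ih =>
    intro i a res h
    have hi : i < a.length := by omega
    rw [cbWrite, ih (i+1) _ _ (by simp; omega)]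
    by_cases hir : i < res.length
    · rw [if_pos hir]
      have hdropr : res.drop i = res[i] :: res.drop (i+1) := List.drop_eq_getElem_cons hir
      have hgetD : res.getD i 0 = res[i] := by simp [List.getD, List.getElem?_eq_getElem hir]
      rw [hgetD, take_succ_set a i res[i] hi, List.drop_set_of_lt (by omega)]
      conv_rhs => rw [hdropr]
      rw [List.take_succ_cons]
      rw [show i + 1 + f = i + (f + 1) from by omega,
        show f + 1 - (res.length - i) = f - (res.length - (i+1)) from by omega]
      simp [List.append_assoc]
    · rw [if_neg hir]
      have hd : res.drop i = [] := List.drop_eq_nil_of_le (by omega)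
      have hd1 : res.drop (i+1) = [] := List.drop_eq_nil_of_le (by omega)
      rw [take_succ_set a i 0 hi, List.drop_set_of_lt (by omega), hd, hd1]
      rw [show i + 1 + f = i + (f + 1) from by omega]
      rw [show f - (res.length - (i+1)) = f from by omega,
        show f + 1 - (res.length - i) = f + 1 from by omega]
      simp [List.replicate_succ, List.append_assoc]

-- ===== VERDICT (by name: the statement is the Claim_ definition above) =====
theorem compress_array_spec : Claim_equal_compress_array := by
  intro N arr _ hpre
  unfold Spec_compress_array
  have hn : N.toNat ≤ arr.length := by
    have := hpre
    unfold Pre_compress_array at this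
    omega
  set n := N.toNat with hn'
  -- pass 1 of A
  have hA1 : caPass1 arr PySem.Set.empty 0 n = gRef PySem.Set.empty (arr.take n) ++ arr.drop n := by
    have := caPass1_eq n 0 arr PySem.Set.empty (by omega)
    simpa using this
  set G := gRef PySem.Set.empty (arr.take n) with hG
  set F := fRef PySem.Set.empty (arr.take n) with hF
  have hlt : (arr.take n).length = n := by simp [hn]
  have hlenG : G.length = n := by rw [hG, gRef_length, hlt]
  have hGF : G.filter (· ≠ 0) = F := filter_gRef _ _ _ (fun x _ => Iff.rfl)
  have hkn : F.length ≤ n := by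
    have := fRef_length_le PySem.Set.empty (arr.take n)
    rw [← hF] at this; omega
  set a1 := G ++ arr.drop n with ha1
  have hlen1 : a1.length = arr.length := by
    rw [ha1]; simp [hlenG]; omega
  -- pass 2 of A
  obtain ⟨h2, junk, hc, hj⟩ := caPass2_eq n 0 0 a1 (Nat.le_refl 0) (by rw [hlen1]; omega)
  have hfil : ((a1.drop 0).take n).filter (· ≠ 0) = F := by
    rw [List.drop_zero, ha1, List.take_left' hlenG]
    exact hGF
  rw [hfil] at h2 hc hj
  have hk : (caPass2 a1 0 0 n).2 = F.length := by rw [h2]; omega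
  have hdrop1 : a1.drop (0 + n) = arr.drop n := by
    rw [Nat.zero_add, ha1, List.drop_left' hlenG]
  rw [hdrop1, List.take_zero, List.nil_append] at hc
  have hjl : junk.length = n - F.length := by omega
  -- pass 3 of A
  have hclen : (caPass2 a1 0 0 n).1.length = arr.length := by
    rw [hc]; simp [hjl, List.length_drop]; omega
  have hA : compress_array N arr
      = F ++ List.replicate (n - F.length) 0 ++ arr.drop n := by
    have hrfl : compress_array N arr
        = caPass3 (caPass2 (caPass1 arr PySem.Set.empty 0 n) 0 0 n).1
            (caPass2 (caPass1 arr PySem.Set.empty 0 n) 0 0 n).2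
            (n - (caPass2 (caPass1 arr PySem.Set.empty 0 n) 0 0 n).2) := rfl
    rw [hrfl, hA1, hk]
    rw [caPass3_eq _ _ _ (by rw [hclen]; omega)]
    have hFj : F.length + (n - F.length) = n := by omega
    rw [hc]
    have htk : (F ++ junk ++ arr.drop n).take F.length = F := by
      rw [List.append_assoc, List.take_left' rfl]
    have hdk : (F ++ junk ++ arr.drop n).drop (F.length + (n - F.length)) = arr.drop n := by
      rw [hFj, List.drop_left' (by simp [hjl]; omega)]
    rw [htk, hdk]
  -- B
  have hres : cbGather arr PySem.Set.empty [] 0 n = F := by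
    have := cbGather_eq n 0 arr [] PySem.Set.empty (by omega)
    simpa using this
  have hB : compress_array_alt N arr
      = F ++ List.replicate (n - F.length) 0 ++ arr.drop n := by
    have hrfl : compress_array_alt N arr
        = cbWrite arr (cbGather arr PySem.Set.empty [] 0 n) 0 n := rfl
    rw [hrfl, hres, cbWrite_eq n 0 arr F (by omega)]
    simp only [List.take_zero, List.nil_append, List.drop_zero, Nat.zero_add, Nat.sub_zero]
    rw [List.take_of_length_le hkn]
  rw [hA, hB]
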